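-- pv_equiv track=rewrite | github.com/veighnsche/android-root | tools/handlers.py | _filter_batch_output
-- ===== SOURCE A (Python) =====
-- def _filter_batch_output(result: str, max_lines: int = 50, grep: str = None) -> str:
--     """Filter each command's output in a batch result."""
--     if not max_lines and not grep:
--         return result
--
--     lines = result.split('\n')
--     filtered_lines = []
--     current_section = []
--     in_section = False
--
--     for line in lines:
--         if line.startswith('[') and ('] SUCCESS' in line or '] FAILED' in line or '] SKIPPED' in line):
--             if current_section:
--                 filtered_lines.extend(_truncate_section(current_section, max_lines, grep))
--             current_section = [line]
--             in_section = True
--         elif in_section: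
--             current_section.append(line)
--         else:
--             filtered_lines.append(line)
--
--     if current_section:
--         filtered_lines.extend(_truncate_section(current_section, max_lines, grep))
--
--     return '\n'.join(filtered_lines)
--
-- def _truncate_section(lines: list, max_lines: int, grep: str) -> list:
--     """Truncate a single command's output section."""
--     if len(lines) <= 1:
--         return lines
--
--     header = lines[0]
--     content = lines[1:]
--
--     if grep:
--         content = [l for l in content if grep in l]
--
--     if max_lines and len(content) > max_lines:
--         truncated_count = len(content) - max_lines
--         content = content[-max_lines:]
--         content.insert(0, f"  ... ({truncated_count} lines truncated)")
--
--     return [header] + content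
-- ===== SOURCE B (Python) =====
-- def _is_header(line):
--     return line.startswith('[') and ('] SUCCESS' in line or '] FAILED' in line or '] SKIPPED' in line)
--
--
-- def _filter_batch_output(result: str, max_lines: int = 50, grep: str = None) -> str:
--     """Filter each command's output in a batch result.
--
--     Staged passes instead of per-section buffering: first collect, per header
--     line index, the indices of its content lines that survive grep; then
--     precompute the keep-set of line indices and the truncation message for each
--     header; finally emit line-by-line with a membership test."""
--     if not max_lines and not grep:
--         return result
--     lines = result.split('\n')
--
--     # pass 1: header line index -> indices of its content lines surviving grep
--     matches = {}
--     cur = -1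
--     for i, line in enumerate(lines):
--         if _is_header(line):
--             cur = i
--         elif cur >= 0:
--             bucket = matches.setdefault(cur, [])
--             if not grep or grep in line:
--                 bucket.append(i)
--
--     # pass 2: keep-set of content line indices + truncation message per header
--     keep = set()
--     msg = {}
--     for h, idx in matches.items():
--         kept = idx
--         if max_lines and len(idx) > max_lines:
--             msg[h] = f"  ... ({len(idx) - max_lines} lines truncated)"
--             kept = idx[-max_lines:]
--         keep.update(kept)
--
--     # pass 3: emit
--     out = []
--     cur = -1
--     for i, line in enumerate(lines):
--         if _is_header(line):
--             cur = i
--             out.append(line)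
--             if i in msg:
--                 out.append(msg[i])
--         elif cur < 0 or i in keep:
--             out.append(line)
--     return '\n'.join(out)
-- ===== Notes on version B (the rewrite author's own statement) =====
-- stated objective: alternative
-- what changed: Replaces A's buffer-a-section-then-truncate loop (current_section/in_section state plus a per-section truncation helper) by staged index passes: a dict from header index to grep-surviving content indices, a precomputed keep-set and per-header truncation messages, and a final line-by-line emit decided by set membership.
import Mathlib
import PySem

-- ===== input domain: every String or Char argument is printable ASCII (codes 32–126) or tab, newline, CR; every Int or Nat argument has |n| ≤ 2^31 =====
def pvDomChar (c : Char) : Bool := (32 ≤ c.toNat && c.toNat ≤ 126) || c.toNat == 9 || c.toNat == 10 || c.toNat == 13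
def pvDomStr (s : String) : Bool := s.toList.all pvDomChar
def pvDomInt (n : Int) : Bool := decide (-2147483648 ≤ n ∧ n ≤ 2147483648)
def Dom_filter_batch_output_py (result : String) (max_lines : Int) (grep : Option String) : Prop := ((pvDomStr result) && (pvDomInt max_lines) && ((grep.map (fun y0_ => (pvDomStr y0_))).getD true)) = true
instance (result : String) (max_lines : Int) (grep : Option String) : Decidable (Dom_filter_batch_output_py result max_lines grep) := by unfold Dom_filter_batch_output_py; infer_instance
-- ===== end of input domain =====

-- B replaces A's buffer-a-section-then-truncate loop by staged index passes: a dict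
-- header-index -> grep-surviving content indices, a precomputed keep-set and per-header
-- truncation messages, then a line-by-line emit decided by set membership
-- (objective: alternative decomposition; same cost).

-- shared atoms: the header test and the truncation-message f-string are the same
-- expressions in both Pythons
def pvIsHeader (l : String) : Bool :=
  PySem.Str.startswith l "[" &&
    (PySem.Str.isIn "] SUCCESS" l || PySem.Str.isIn "] FAILED" l || PySem.Str.isIn "] SKIPPED" l)

def pvFalsyGrep : Option String → Bool
  | none => true
  | some s => s == ""

-- `not grep or grep in line`
def pvMatchLine (g : Option String) (l : String) : Bool :=
  match g with
  | none => true
  | some s => s == "" || PySem.Str.isIn s l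

-- f"  ... ({n} lines truncated)"
def pvMsgStr (n : Int) : String := "  ... (" ++ PySem.Int.toStr n ++ " lines truncated)"

-- ===== PORT A =====
-- _truncate_section
def pvTrunc (lines : List String) (max_lines : Int) (grep : Option String) : List String :=
  if lines.length ≤ 1 then lines else
  match lines with
  | [] => []
  | header :: content0 =>
    let content :=
      match grep with
      | some g => if g == "" then content0 else content0.filter (fun l => PySem.Str.isIn g l)
      | none => content0
    let content :=
      if max_lines ≠ 0 ∧ max_lines < (content.length : Int) then
        pvMsgStr ((content.length : Int) - max_lines)
          :: PySem.List.slice content (some (-max_lines)) none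
      else content
    header :: content

-- A's for-loop over lines with state (filtered_lines, current_section, in_section)
def pvLoopA (ml : Int) (g : Option String) :
    List String → List String → List String → Bool → List String
  | [], filtered, current, _ =>
      filtered ++ (if current.isEmpty then [] else pvTrunc current ml g)
  | l :: ls, filtered, current, insec =>
      if pvIsHeader l then
        pvLoopA ml g ls (filtered ++ (if current.isEmpty then [] else pvTrunc current ml g)) [l] true
      else if insec then
        pvLoopA ml g ls filtered (current ++ [l]) insec
      else
        pvLoopA ml g ls (filtered ++ [l]) current insec

def filter_batch_output_py (result : String) (max_lines : Int) (grep : Option String) : String :=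
  if max_lines == 0 && pvFalsyGrep grep then result
  else
    PySem.Str.join "\n" (pvLoopA max_lines grep ((PySem.Str.split? result "\n").getD []) [] [] false)

-- ===== PORT B =====
-- pass 1: header line index -> indices of its content lines surviving grep
-- (`bucket.append(i)` = overwrite the bucket with the extended list)
def pvPass1 (g : Option String) : Int → Int → PySem.Dict Int (List Int) → List String →
    PySem.Dict Int (List Int)
  | _, _, d, [] => d
  | i, cur, d, l :: ls =>
    if pvIsHeader l then
      pvPass1 g (i + 1) i d ls
    else if 0 ≤ cur then
      let d1 := d.setdefault cur []
      let d2 := if pvMatchLine g l then d1.insert cur (d1.getD cur [] ++ [i]) else d1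
      pvPass1 g (i + 1) cur d2 ls
    else
      pvPass1 g (i + 1) cur d ls

-- pass 2: keep-set of content line indices + truncation message per header
def pvPass2 (ml : Int) (items : List (Int × List Int)) :
    PySem.Set Int × PySem.Dict Int String :=
  items.foldl
    (fun st p =>
      let kept := if ml ≠ 0 ∧ ml < (p.2.length : Int)
        then PySem.List.slice p.2 (some (-ml)) none else p.2
      (PySem.Set.update st.1 kept,
       if ml ≠ 0 ∧ ml < (p.2.length : Int)
         then st.2.insert p.1 (pvMsgStr ((p.2.length : Int) - ml)) else st.2))
    (PySem.Set.empty, PySem.Dict.empty)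

-- pass 3: emit line-by-line
def pvPass3 (keep : PySem.Set Int) (msg : PySem.Dict Int String) :
    Int → Int → List String → List String
  | _, _, [] => []
  | i, cur, l :: ls =>
    if pvIsHeader l then
      (l :: (match msg.get? i with | some m => [m] | none => [])) ++ pvPass3 keep msg (i + 1) i ls
    else if cur < 0 || PySem.Set.contains keep i then
      l :: pvPass3 keep msg (i + 1) cur ls
    else
      pvPass3 keep msg (i + 1) cur ls

def filter_batch_output_py_alt (result : String) (max_lines : Int) (grep : Option String) : String :=
  if max_lines == 0 && pvFalsyGrep grep then result
  else
    let lines := (PySem.Str.split? result "\n").getD []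
    let m := pvPass1 grep 0 (-1) PySem.Dict.empty lines
    let km := pvPass2 max_lines m.items
    PySem.Str.join "\n" (pvPass3 km.1 km.2 0 (-1) lines)

-- ===== PRECONDITION & SPEC =====
def Spec_filter_batch_output_py (result : String) (max_lines : Int) (grep : Option String) (out : String) : Prop := out = filter_batch_output_py_alt result max_lines grep
instance (result : String) (max_lines : Int) (grep : Option String) (out : String) : Decidable (Spec_filter_batch_output_py result max_lines grep out) := by unfold Spec_filter_batch_output_py; infer_instance

-- ===== CLAIM (what is proved, stated in full; the proofs are below) =====
def Claim_equal_filter_batch_output_py : Prop := ∀ (result : String) (max_lines : Int) (grep : Option String), Dom_filter_batch_output_py result max_lines grep → Spec_filter_batch_output_py result max_lines grep (filter_batch_output_py result max_lines grep)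

-- ===== LEMMAS AND PROOFS =====

-- ---------- proof-side vocabulary ----------

def pvNH (l : String) : Bool := !pvIsHeader l

-- maximal header-started chunks of a line list
def pvSections : List String → List (List String)
  | [] => []
  | l :: ls =>
      (l :: ls.takeWhile pvNH) :: pvSections (ls.dropWhile pvNH)
  termination_by ls => ls.length
  decreasing_by simpa using Nat.lt_succ_of_le (List.length_dropWhile_le _ _)

-- enumerate from i
def pvEnum (i : Int) : List String → List (Int × String)
  | [] => []
  | c :: cs => (i, c) :: pvEnum (i + 1) cs

-- the grep-surviving content lines of a section, with their indices
def pvF (g : Option String) (i : Int) (cs : List String) : List (Int × String) :=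
  (pvEnum i cs).filter (fun p => pvMatchLine g p.2)

-- specification of pass 1's dict items
def pvItemsSpec (g : Option String) (i : Int) : List String → List (Int × List Int)
  | [] => []
  | l :: ls =>
    if pvIsHeader l then
      let tw := ls.takeWhile pvNH
      (if tw.isEmpty then [] else [(i, (pvF g (i + 1) tw).map Prod.fst)]) ++
        pvItemsSpec g (i + 1 + tw.length) (ls.dropWhile pvNH)
    else
      pvItemsSpec g (i + 1) ls
  termination_by ls => ls.length
  decreasing_by
  · simpa using Nat.lt_succ_of_le (List.length_dropWhile_le _ _)
  · simp

def pvKeptOf (ml : Int) (idx : List Int) : List Int :=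
  if ml ≠ 0 ∧ ml < (idx.length : Int) then PySem.List.slice idx (some (-ml)) none else idx

-- ---------- A = canonical ----------

theorem pvLoopA_in (ml : Int) (g : Option String) :
    ∀ (ls filtered cur : List String), cur ≠ [] →
      pvLoopA ml g ls filtered cur true =
        filtered ++ pvTrunc (cur ++ ls.takeWhile pvNH) ml g
          ++ (pvSections (ls.dropWhile pvNH)).flatMap (fun s => pvTrunc s ml g) := by
  intro ls
  induction ls with
  | nil =>
      intro filtered cur hcur
      simp [pvLoopA, pvSections, List.isEmpty_iff, hcur]
  | cons l ls ih =>
      intro filtered cur hcur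
      by_cases h : pvIsHeader l = true
      · have e : pvLoopA ml g (l :: ls) filtered cur true =
            pvLoopA ml g ls (filtered ++ pvTrunc cur ml g) [l] true := by
          simp [pvLoopA, h, List.isEmpty_iff, hcur]
        rw [e, ih _ [l] (by simp)]
        simp [pvNH, h, pvSections, List.append_assoc]
      · have e : pvLoopA ml g (l :: ls) filtered cur true =
            pvLoopA ml g ls filtered (cur ++ [l]) true := by
          simp [pvLoopA, h]
        rw [e, ih _ (cur ++ [l]) (by simp)]
        simp [pvNH, h, List.append_assoc]

theorem pvLoopA_pre (ml : Int) (g : Option String) :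
    ∀ (ls filtered : List String),
      pvLoopA ml g ls filtered [] false =
        filtered ++ ls.takeWhile pvNH
          ++ (pvSections (ls.dropWhile pvNH)).flatMap (fun s => pvTrunc s ml g) := by
  intro ls
  induction ls with
  | nil => intro filtered; simp [pvLoopA, pvSections]
  | cons l ls ih =>
      intro filtered
      by_cases h : pvIsHeader l = true
      · have e : pvLoopA ml g (l :: ls) filtered [] false =
            pvLoopA ml g ls filtered [l] true := by
          simp [pvLoopA, h]
        rw [e, pvLoopA_in ml g ls _ [l] (by simp)]
        simp [pvNH, h, pvSections, List.append_assoc]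
      · have e : pvLoopA ml g (l :: ls) filtered [] false =
            pvLoopA ml g ls (filtered ++ [l]) [] false := by
          simp [pvLoopA, h]
        rw [e, ih]
        simp [pvNH, h, List.append_assoc]


-- ---------- small utilities ----------

theorem pvEnum_fst_bounds : ∀ (cs : List String) (i : Int) (q : Int × String),
    q ∈ pvEnum i cs → i ≤ q.1 ∧ q.1 < i + cs.length := by
  intro cs
  induction cs with
  | nil => intro i q h; simp [pvEnum] at h
  | cons c cs ih =>
      intro i q h
      simp only [pvEnum, List.mem_cons] at h
      rcases h with h | h
      · subst h
        refine ⟨le_refl _, ?_⟩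
        simp only [List.length_cons]
        push_cast
        omega
      · have := ih (i + 1) q h
        simp only [List.length_cons]
        push_cast
        omega

theorem pvEnum_fst_pairwise : ∀ (cs : List String) (i : Int),
    ((pvEnum i cs).map Prod.fst).Pairwise (· < ·) := by
  intro cs
  induction cs with
  | nil => intro i; simp [pvEnum]
  | cons c cs ih =>
      intro i
      simp only [pvEnum, List.map_cons, List.pairwise_cons]
      refine ⟨?_, ih (i + 1)⟩
      intro x hx
      obtain ⟨q, hq, rfl⟩ := List.mem_map.mp hx
      have := pvEnum_fst_bounds cs (i + 1) q hq
      omega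

theorem pvEnum_fst_nodup (cs : List String) (i : Int) :
    ((pvEnum i cs).map Prod.fst).Nodup :=
  (pvEnum_fst_pairwise cs i).nodup

theorem pvF_sublist (g : Option String) (i : Int) (cs : List String) :
    (pvF g i cs).Sublist (pvEnum i cs) := List.filter_sublist

theorem pvF_map_snd (g : Option String) : ∀ (cs : List String) (i : Int),
    (pvF g i cs).map Prod.snd = cs.filter (pvMatchLine g) := by
  intro cs
  induction cs with
  | nil => intro i; simp [pvF, pvEnum]
  | cons c cs ih =>
      intro i
      by_cases h : pvMatchLine g c = true
      · simp [pvF, pvEnum, List.filter_cons, h] at ih ⊢; exact ih (i + 1)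
      · simp [pvF, pvEnum, List.filter_cons, h] at ih ⊢; exact ih (i + 1)

-- grep filtering in pvTrunc is filtering by pvMatchLine
theorem pvTrunc_content (g : Option String) (cs : List String) :
    (match g with
      | some s => if s == "" then cs else cs.filter (fun l => PySem.Str.isIn s l)
      | none => cs) = cs.filter (pvMatchLine g) := by
  cases g with
  | none =>
      rw [eq_comm, List.filter_eq_self]
      intro a _; simp [pvMatchLine]
  | some s =>
      by_cases h : (s == "") = true
      · simp only [h, if_true]
        rw [eq_comm, List.filter_eq_self]
        intro a _; simp [pvMatchLine, h]
      · simp only [h, if_false]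
        apply List.filter_congr
        intro x _
        simp [pvMatchLine, h]

-- selecting by membership in (the key list of) a sublist recovers the sublist
theorem pvSelect_sublist {F' e : List (Int × String)} (hs : F'.Sublist e) :
    ((e.map Prod.fst).Nodup) →
    e.filter (fun q => decide (q.1 ∈ F'.map Prod.fst)) = F' := by
  induction hs with
  | slnil => intro _; simp
  | @cons l₁ l₂ a hs ih =>
      intro hnd
      simp only [List.map_cons, List.nodup_cons] at hnd
      have hnot : a.1 ∉ l₁.map Prod.fst := by
        intro hmem
        exact hnd.1 ((hs.map Prod.fst).subset hmem)
      rw [List.filter_cons]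
      simp only [hnot, decide_false]
      simpa using ih hnd.2
  | @cons₂ l₁ l₂ a hs ih =>
      intro hnd
      simp only [List.map_cons, List.nodup_cons] at hnd
      rw [List.filter_cons]
      simp only [List.map_cons, List.mem_cons, true_or, decide_true, if_pos]
      have hcg : l₂.filter (fun q => decide (q.1 = a.1 ∨ q.1 ∈ l₁.map Prod.fst)) =
          l₂.filter (fun q => decide (q.1 ∈ l₁.map Prod.fst)) := by
        apply List.filter_congr
        intro x hx
        have hne : x.1 ≠ a.1 := by
          intro hEq
          exact hnd.1 (hEq ▸ List.mem_map_of_mem hx)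
        simp [hne]
      rw [hcg, ih hnd.2]

-- ---------- pvItemsSpec facts ----------

theorem pvItemsSpec_skip (g : Option String) : ∀ (xs ys : List String) (i : Int),
    (∀ l ∈ xs, pvIsHeader l = false) →
    pvItemsSpec g i (xs ++ ys) = pvItemsSpec g (i + xs.length) ys := by
  intro xs
  induction xs with
  | nil => intro ys i _; simp
  | cons x xs ih =>
      intro ys i h
      have hx : pvIsHeader x = false := h x (by simp)
      rw [List.cons_append, pvItemsSpec]
      simp only [hx, Bool.false_eq_true, if_false]
      rw [ih ys (i + 1) (fun l hl => h l (by simp [hl]))]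
      congr 1
      simp only [List.length_cons]
      push_cast
      ring

theorem pvItemsSpec_bounds (g : Option String) : ∀ (n : Nat) (lines : List String),
    lines.length ≤ n → ∀ (i : Int) (e : Int × List Int), e ∈ pvItemsSpec g i lines →
      i ≤ e.1 ∧ (∀ x ∈ e.2, e.1 < x ∧ x < i + lines.length) := by
  intro n
  induction n with
  | zero =>
      intro lines hlen i e he
      have : lines = [] := List.eq_nil_of_length_eq_zero (Nat.le_zero.mp hlen)
      subst this; simp [pvItemsSpec] at he
  | succ n ih =>
      intro lines hlen i e he
      match lines with
      | [] => simp [pvItemsSpec] at he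
      | l :: ls =>
        have htw_le : (ls.takeWhile pvNH).length ≤ ls.length :=
          (List.takeWhile_sublist _).length_le
        have hsum : (ls.takeWhile pvNH).length + (ls.dropWhile pvNH).length = ls.length := by
          have h1 := congrArg List.length (List.takeWhile_append_dropWhile (p := pvNH) (l := ls))
          rw [List.length_append] at h1
          exact h1
        rw [pvItemsSpec] at he
        by_cases hl : pvIsHeader l = true
        · simp only [hl, if_true, List.mem_append] at he
          rcases he with he | he
          · have htw : ¬(ls.takeWhile pvNH).isEmpty = true := by
              intro h; simp [h] at he
            simp only [htw, Bool.false_eq_true, if_false, List.mem_singleton] at he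
            subst he
            refine ⟨le_refl _, ?_⟩
            intro x hx
            simp only at hx
            obtain ⟨q, hq, rfl⟩ := List.mem_map.mp hx
            have hq' : q ∈ pvEnum (i + 1) (ls.takeWhile pvNH) :=
              (pvF_sublist g (i + 1) _).subset hq
            have := pvEnum_fst_bounds _ (i + 1) q hq'
            simp only [List.length_cons]
            push_cast
            omega
          · have hrec := ih (ls.dropWhile pvNH)
              (by simp only [List.length_cons] at hlen; omega)
              (i + 1 + (ls.takeWhile pvNH).length) e he
            simp only [List.length_cons]
            constructor
            · omega
            · intro x hx
              have := hrec.2 x hx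
              push_cast at this ⊢
              omega
        · simp only [hl, if_false] at he
          have hrec := ih ls (by simp only [List.length_cons] at hlen; omega) (i + 1) e he
          simp only [List.length_cons]
          constructor
          · omega
          · intro x hx
            have := hrec.2 x hx
            push_cast at this ⊢
            omega

theorem pvItemsSpec_keys_pairwise (g : Option String) : ∀ (n : Nat) (lines : List String),
    lines.length ≤ n → ∀ (i : Int),
      ((pvItemsSpec g i lines).map Prod.fst).Pairwise (· < ·) := by
  intro n
  induction n with
  | zero =>
      intro lines hlen i
      have : lines = [] := List.eq_nil_of_length_eq_zero (Nat.le_zero.mp hlen)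
      subst this; simp [pvItemsSpec]
  | succ n ih =>
      intro lines hlen i
      match lines with
      | [] => simp [pvItemsSpec]
      | l :: ls =>
        rw [pvItemsSpec]
        by_cases hl : pvIsHeader l = true
        · simp only [hl, if_true, List.map_append]
          have hrec := ih (ls.dropWhile pvNH)
            (by
              have := (List.dropWhile_sublist (p := pvNH) (l := ls)).length_le
              simp only [List.length_cons] at hlen; omega)
            (i + 1 + (ls.takeWhile pvNH).length)
          rw [List.pairwise_append]
          refine ⟨?_, hrec, ?_⟩
          · split <;> simp
          · intro a ha b hb
            have ha' : a = i := by
              split at ha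
              · simp at ha
              · simp at ha; omega
            obtain ⟨e, he, rfl⟩ := List.mem_map.mp hb
            have := (pvItemsSpec_bounds g (ls.dropWhile pvNH).length _ (le_refl _) _ e he).1
            omega
        · simp only [hl, if_false]
          exact ih ls (by simp only [List.length_cons] at hlen; omega) (i + 1)

theorem pvKeptOf_subset (ml : Int) (idx : List Int) : ∀ x ∈ pvKeptOf ml idx, x ∈ idx := by
  intro x hx
  unfold pvKeptOf at hx
  split at hx
  · exact PySem.List.mem_of_mem_slice _ _ _ hx
  · exact hx

-- unique key lookup by find?
theorem pvFind_of_nodup : ∀ (its : List (Int × List Int)) (e : Int × List Int),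
    ((its.map Prod.fst).Nodup) → e ∈ its →
    its.find? (fun p => p.1 == e.1) = some e := by
  intro its
  induction its with
  | nil => intro e _ h; simp at h
  | cons a its ih =>
      intro e hnd he
      simp only [List.map_cons, List.nodup_cons] at hnd
      rcases List.mem_cons.mp he with rfl | he'
      · simp [List.find?_cons]
      · have hne : (a.1 == e.1) = false := by
          simp only [beq_eq_false_iff_ne, ne_eq]
          intro hEq
          exact hnd.1 (hEq ▸ List.mem_map_of_mem he')
        rw [List.find?_cons, hne]
        exact ih e hnd.2 he'

-- ---------- pass 1 characterization ----------

theorem pvMapKeep : ∀ (its : List (Int × List Int)) (k : Int) (v : List Int),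
    (∀ q ∈ its, q.1 ≠ k) →
    its.map (fun q => if q.1 == k then (k, v) else q) = its := by
  intro its k v
  induction its with
  | nil => intro _; simp
  | cons a its ih =>
      intro h
      have ha : (a.1 == k) = false := by
        simp only [beq_eq_false_iff_ne, ne_eq]
        exact h a (by simp)
      simp only [List.map_cons, ha, Bool.false_eq_true, if_false]
      rw [ih (fun q hq => h q (by simp [hq]))]

theorem pvPass1_char (g : Option String) : ∀ (n : Nat) (lines : List String), lines.length ≤ n →
    (∀ (i : Int) (d : PySem.Dict Int (List Int)), 0 ≤ i → d.keys.Nodup → (∀ k ∈ d.keys, k < i) →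
      pvPass1 g i (-1) d lines = PySem.Dict.mk (d.items ++ pvItemsSpec g i lines))
    ∧
    (∀ (i p : Int) (d : PySem.Dict Int (List Int)), 0 ≤ p → p < i →
      d.keys.Nodup → (∀ k ∈ d.keys, k < i) → d.contains p = false →
      pvPass1 g i p d lines =
        PySem.Dict.mk (d.items ++
          (if (lines.takeWhile pvNH).isEmpty then []
            else [(p, (pvF g i (lines.takeWhile pvNH)).map Prod.fst)]) ++
          pvItemsSpec g (i + (lines.takeWhile pvNH).length) (lines.dropWhile pvNH)))
    ∧
    (∀ (i p : Int) (its : List (Int × List Int)) (v : List Int), 0 ≤ p → p < i →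
      (((its ++ [(p, v)]).map Prod.fst).Nodup) →
      (∀ k ∈ (its ++ [(p, v)]).map Prod.fst, k < i) →
      pvPass1 g i p (PySem.Dict.mk (its ++ [(p, v)])) lines =
        PySem.Dict.mk (its ++ [(p, v ++ (pvF g i (lines.takeWhile pvNH)).map Prod.fst)] ++
          pvItemsSpec g (i + (lines.takeWhile pvNH).length) (lines.dropWhile pvNH))) := by
  intro n
  induction n with
  | zero =>
      intro lines hlen
      have : lines = [] := List.eq_nil_of_length_eq_zero (Nat.le_zero.mp hlen)
      subst this
      refine ⟨?_, ?_, ?_⟩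
      · intro i d _ _ _; simp [pvPass1, pvItemsSpec]
      · intro i p d _ _ _ _ _; simp [pvPass1, pvItemsSpec]
      · intro i p its v _ _ _ _; simp [pvPass1, pvItemsSpec, pvF, pvEnum]
  | succ n ihn =>
      intro lines hlen
      match lines with
      | [] =>
        refine ⟨?_, ?_, ?_⟩
        · intro i d _ _ _; simp [pvPass1, pvItemsSpec]
        · intro i p d _ _ _ _ _; simp [pvPass1, pvItemsSpec]
        · intro i p its v _ _ _ _; simp [pvPass1, pvItemsSpec, pvF, pvEnum]
      | l :: ls =>
        have hlen' : ls.length ≤ n := by simp only [List.length_cons] at hlen; omega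
        obtain ⟨IHa, IHb, IHc⟩ := ihn ls hlen'
        refine ⟨?_, ?_, ?_⟩
        -- (a) preamble state
        · intro i d hi hnd hlt
          rw [pvPass1]
          by_cases hl : pvIsHeader l = true
          · simp only [hl, if_true]
            have hcont : d.contains i = false := by
              rw [← Bool.not_eq_true, PySem.Dict.contains_iff_mem_keys]
              intro hmem
              exact absurd (hlt i hmem) (by omega)
            rw [IHb (i + 1) i d hi (by omega) hnd (fun k hk => by have := hlt k hk; omega) hcont]
            rw [pvItemsSpec]
            simp only [hl, if_true, List.append_assoc]
            try rw [show i + 1 + ((ls.takeWhile pvNH).length : Int) =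
                i + (1 + ((ls.takeWhile pvNH).length : Int)) by ring]
          · simp only [hl, Bool.false_eq_true, if_false]
            have hneg : ¬(0 : Int) ≤ -1 := by omega
            rw [if_neg hneg]
            rw [IHa (i + 1) d (by omega) hnd (fun k hk => by have := hlt k hk; omega)]
            rw [pvItemsSpec]
            simp only [hl, Bool.false_eq_true, if_false]
        -- (b) fresh section state
        · intro i p d hp hpi hnd hlt hcont
          rw [pvPass1]
          by_cases hl : pvIsHeader l = true
          · simp only [hl, if_true]
            have hcont' : d.contains i = false := by
              rw [← Bool.not_eq_true, PySem.Dict.contains_iff_mem_keys]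
              intro hmem
              exact absurd (hlt i hmem) (by omega)
            rw [IHb (i + 1) i d (by omega) (by omega) hnd
              (fun k hk => by have := hlt k hk; omega) hcont']
            have htw : (l :: ls).takeWhile pvNH = [] := by
              simp [List.takeWhile_cons, pvNH, hl]
            have hdw : (l :: ls).dropWhile pvNH = l :: ls := by
              simp [List.dropWhile_cons, pvNH, hl]
            rw [htw, hdw]
            simp only [List.isEmpty_nil, if_true, List.length_nil]
            rw [pvItemsSpec]
            simp only [hl, if_true, List.append_assoc]
            norm_num
            try rw [show i + 1 + ((ls.takeWhile pvNH).length : Int) =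
                i + (1 + ((ls.takeWhile pvNH).length : Int)) by ring]
          · simp only [hl, Bool.false_eq_true, if_false, if_pos hp]
            -- setdefault on a fresh key inserts (p, [])
            have hstep1 : d.setdefault p [] = d.insert p [] :=
              PySem.Dict.setdefault_of_not_contains d [] hcont
            have hitems1 : (d.insert p []).items = d.items ++ [(p, ([] : List Int))] :=
              PySem.Dict.items_insert_of_not_contains d [] hcont
            have hkeysnd : ((d.items ++ [(p, ([] : List Int))]).map Prod.fst).Nodup := by
              have hpnot : p ∉ d.items.map Prod.fst := by
                intro hmem
                have hc : d.contains p = true := by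
                  rw [PySem.Dict.contains_iff_mem_keys]
                  simpa [PySem.Dict.keys] using hmem
                rw [hc] at hcont; cases hcont
              have hnd0 : (d.items.map Prod.fst).Nodup := by
                simpa [PySem.Dict.keys] using hnd
              rw [List.map_append, List.nodup_append]
              refine ⟨hnd0, by simp, ?_⟩
              intro a ha b hbmem
              have hb' : b = p := by simpa using hbmem
              subst hb'
              intro hEq
              exact hpnot (hEq ▸ ha)
            have hkeylt : ∀ k ∈ (d.items ++ [(p, ([] : List Int))]).map Prod.fst, k < i + 1 := by
              intro k hk
              simp only [List.map_append, List.mem_append, List.map_cons, List.map_nil,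
                List.mem_singleton] at hk
              rcases hk with hk | hk
              · have := hlt k (by simpa [PySem.Dict.keys] using hk); omega
              · omega
            by_cases hm : pvMatchLine g l = true
            · simp only [hm, if_true]
              have hd1 : d.setdefault p [] = PySem.Dict.mk (d.items ++ [(p, ([] : List Int))]) := by
                rw [hstep1]
                apply PySem.Dict.ext
                simpa using hitems1
              rw [hd1]
              have hgetD : (PySem.Dict.mk (d.items ++ [(p, ([] : List Int))])).getD p [] = [] := by
                apply PySem.Dict.getD_of_mem_items
                · simp
                · simpa [PySem.Dict.keys] using hkeysnd
              rw [hgetD]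
              have hcont2 : (PySem.Dict.mk (d.items ++ [(p, ([] : List Int))])).contains p = true := by
                rw [PySem.Dict.contains_iff_mem_keys]
                simp [PySem.Dict.keys]
              have hins : ((PySem.Dict.mk (d.items ++ [(p, ([] : List Int))])).insert p
                  ([] ++ [i])).items = d.items ++ [(p, [i])] := by
                rw [PySem.Dict.items_insert_of_contains _ _ hcont2]
                have : (PySem.Dict.mk (d.items ++ [(p, ([] : List Int))])).items
                    = d.items ++ [(p, ([] : List Int))] := rfl
                rw [this, List.map_append]
                congr 1
                · apply pvMapKeep
                  intro q hq hEq
                  have : q.1 ∈ d.keys := by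
                    simpa [PySem.Dict.keys] using List.mem_map_of_mem (f := Prod.fst) hq
                  rw [← PySem.Dict.contains_iff_mem_keys] at this
                  rw [hEq] at this
                  rw [this] at hcont; cases hcont
                · simp
              have hd2 : (PySem.Dict.mk (d.items ++ [(p, ([] : List Int))])).insert p ([] ++ [i])
                  = PySem.Dict.mk (d.items ++ [(p, [i])]) := by
                apply PySem.Dict.ext
                simpa using hins
              rw [hd2]
              rw [IHc (i + 1) p d.items [i] hp (by omega)
                (by simpa using hkeysnd)
                (by intro k hk; exact hkeylt k (by simpa using hk))]
              -- align with the spec of (l :: ls)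
              have htw : (l :: ls).takeWhile pvNH = l :: ls.takeWhile pvNH := by
                simp [List.takeWhile_cons, pvNH, hl]
              have hdw : (l :: ls).dropWhile pvNH = ls.dropWhile pvNH := by
                simp [List.dropWhile_cons, pvNH, hl]
              rw [htw, hdw]
              have hF : (pvF g i (l :: ls.takeWhile pvNH)).map Prod.fst =
                  [i] ++ (pvF g (i + 1) (ls.takeWhile pvNH)).map Prod.fst := by
                simp [pvF, pvEnum, List.filter_cons, hm]
              rw [hF]
              simp only [List.isEmpty_cons, List.length_cons, List.append_assoc]
              norm_num
              try rw [show i + (((ls.takeWhile pvNH).length : Int) + 1) =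
                  i + 1 + ((ls.takeWhile pvNH).length : Int) by ring]
            · simp only [hm, Bool.false_eq_true, if_false]
              have hd1 : d.setdefault p [] = PySem.Dict.mk (d.items ++ [(p, ([] : List Int))]) := by
                rw [hstep1]
                apply PySem.Dict.ext
                simpa using hitems1
              rw [hd1]
              rw [IHc (i + 1) p d.items [] hp (by omega)
                (by simpa using hkeysnd)
                (by intro k hk; exact hkeylt k (by simpa using hk))]
              have htw : (l :: ls).takeWhile pvNH = l :: ls.takeWhile pvNH := by
                simp [List.takeWhile_cons, pvNH, hl]
              have hdw : (l :: ls).dropWhile pvNH = ls.dropWhile pvNH := by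
                simp [List.dropWhile_cons, pvNH, hl]
              rw [htw, hdw]
              have hF : (pvF g i (l :: ls.takeWhile pvNH)).map Prod.fst =
                  (pvF g (i + 1) (ls.takeWhile pvNH)).map Prod.fst := by
                simp [pvF, pvEnum, List.filter_cons, hm]
              rw [hF]
              simp only [List.isEmpty_cons, List.length_cons, List.append_assoc]
              norm_num
              try rw [show i + (((ls.takeWhile pvNH).length : Int) + 1) =
                  i + 1 + ((ls.takeWhile pvNH).length : Int) by ring]
        -- (c) inside-section state, current bucket is the last item
        · intro i p its v hp hpi hnd hlt
          have hpits : ∀ q ∈ its, q.1 ≠ p := by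
            intro q hq hEq
            have hnd' := hnd
            rw [List.map_append] at hnd'
            rcases List.nodup_append.mp hnd' with ⟨_, _, hdisj⟩
            have hq1 : q.1 ∈ its.map Prod.fst := List.mem_map_of_mem hq
            rw [hEq] at hq1
            exact (hdisj p hq1 p (by simp)) rfl
          have hkeys : (PySem.Dict.mk (its ++ [(p, v)])).keys = (its ++ [(p, v)]).map Prod.fst := by
            simp [PySem.Dict.keys]
          rw [pvPass1]
          by_cases hl : pvIsHeader l = true
          · simp only [hl, if_true]
            have hcont' : (PySem.Dict.mk (its ++ [(p, v)])).contains i = false := by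
              rw [← Bool.not_eq_true, PySem.Dict.contains_iff_mem_keys]
              intro hmem
              rw [hkeys] at hmem
              exact absurd (hlt i hmem) (by omega)
            rw [IHb (i + 1) i (PySem.Dict.mk (its ++ [(p, v)])) (by omega) (by omega)
              (by rw [hkeys]; exact hnd)
              (by intro k hk; rw [hkeys] at hk; have := hlt k hk; omega) hcont']
            have htw : (l :: ls).takeWhile pvNH = [] := by
              simp [List.takeWhile_cons, pvNH, hl]
            have hdw : (l :: ls).dropWhile pvNH = l :: ls := by
              simp [List.dropWhile_cons, pvNH, hl]
            rw [htw, hdw]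
            simp only [List.isEmpty_nil, if_true, List.length_nil]
            rw [pvItemsSpec]
            simp only [hl, if_true, List.append_assoc]
            have hFnil : (pvF g i ([] : List String)).map Prod.fst = [] := by
              simp [pvF, pvEnum]
            rw [hFnil]
            norm_num
            try rw [show i + 1 + ((ls.takeWhile pvNH).length : Int) =
                i + (1 + ((ls.takeWhile pvNH).length : Int)) by ring]
          · simp only [hl, Bool.false_eq_true, if_false, if_pos hp]
            have hcontp : (PySem.Dict.mk (its ++ [(p, v)])).contains p = true := by
              rw [PySem.Dict.contains_iff_mem_keys, hkeys]
              simp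
            have hd1 : (PySem.Dict.mk (its ++ [(p, v)])).setdefault p [] =
                PySem.Dict.mk (its ++ [(p, v)]) :=
              PySem.Dict.setdefault_of_contains _ [] hcontp
            rw [hd1]
            by_cases hm : pvMatchLine g l = true
            · simp only [hm, if_true]
              have hgetD : (PySem.Dict.mk (its ++ [(p, v)])).getD p [] = v := by
                apply PySem.Dict.getD_of_mem_items
                · simp
                · rw [hkeys]; exact hnd
              rw [hgetD]
              have hins : ((PySem.Dict.mk (its ++ [(p, v)])).insert p (v ++ [i])).items
                  = its ++ [(p, v ++ [i])] := by
                rw [PySem.Dict.items_insert_of_contains _ _ hcontp]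
                have : (PySem.Dict.mk (its ++ [(p, v)])).items = its ++ [(p, v)] := rfl
                rw [this, List.map_append]
                congr 1
                · exact pvMapKeep its p (v ++ [i]) hpits
                · simp
              have hd2 : (PySem.Dict.mk (its ++ [(p, v)])).insert p (v ++ [i])
                  = PySem.Dict.mk (its ++ [(p, v ++ [i])]) := by
                apply PySem.Dict.ext
                simpa using hins
              rw [hd2]
              rw [IHc (i + 1) p its (v ++ [i]) hp (by omega)
                (by simpa using hnd)
                (by intro k hk; have := hlt k (by simpa using hk); omega)]
              have htw : (l :: ls).takeWhile pvNH = l :: ls.takeWhile pvNH := by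
                simp [List.takeWhile_cons, pvNH, hl]
              have hdw : (l :: ls).dropWhile pvNH = ls.dropWhile pvNH := by
                simp [List.dropWhile_cons, pvNH, hl]
              rw [htw, hdw]
              have hF : (pvF g i (l :: ls.takeWhile pvNH)).map Prod.fst =
                  [i] ++ (pvF g (i + 1) (ls.takeWhile pvNH)).map Prod.fst := by
                simp [pvF, pvEnum, List.filter_cons, hm]
              rw [hF]
              simp only [List.length_cons, List.append_assoc]
              norm_num
              try rw [show i + (((ls.takeWhile pvNH).length : Int) + 1) =
                  i + 1 + ((ls.takeWhile pvNH).length : Int) by ring]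
            · simp only [hm, Bool.false_eq_true, if_false]
              rw [IHc (i + 1) p its v hp (by omega)
                (by simpa using hnd)
                (by intro k hk; have := hlt k (by simpa using hk); omega)]
              have htw : (l :: ls).takeWhile pvNH = l :: ls.takeWhile pvNH := by
                simp [List.takeWhile_cons, pvNH, hl]
              have hdw : (l :: ls).dropWhile pvNH = ls.dropWhile pvNH := by
                simp [List.dropWhile_cons, pvNH, hl]
              rw [htw, hdw]
              have hF : (pvF g i (l :: ls.takeWhile pvNH)).map Prod.fst =
                  (pvF g (i + 1) (ls.takeWhile pvNH)).map Prod.fst := by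
                simp [pvF, pvEnum, List.filter_cons, hm]
              rw [hF]
              simp only [List.length_cons, List.append_assoc]
              norm_num
              try rw [show i + (((ls.takeWhile pvNH).length : Int) + 1) =
                  i + 1 + ((ls.takeWhile pvNH).length : Int) by ring]

-- ---------- pass 2 characterization ----------

def pvKeepFold (ml : Int) (its : List (Int × List Int)) (s0 : PySem.Set Int) : PySem.Set Int :=
  its.foldl (fun s p => PySem.Set.update s (pvKeptOf ml p.2)) s0

def pvMsgFold (ml : Int) (its : List (Int × List Int)) (m0 : PySem.Dict Int String) :
    PySem.Dict Int String :=
  its.foldl (fun m p =>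
    if ml ≠ 0 ∧ ml < (p.2.length : Int)
      then m.insert p.1 (pvMsgStr ((p.2.length : Int) - ml)) else m) m0

theorem pvPass2_foldl (ml : Int) : ∀ (its : List (Int × List Int)) (s : PySem.Set Int)
    (m : PySem.Dict Int String),
    its.foldl
      (fun st p =>
        let kept := if ml ≠ 0 ∧ ml < (p.2.length : Int)
          then PySem.List.slice p.2 (some (-ml)) none else p.2
        (PySem.Set.update st.1 kept,
         if ml ≠ 0 ∧ ml < (p.2.length : Int)
           then st.2.insert p.1 (pvMsgStr ((p.2.length : Int) - ml)) else st.2)) (s, m) =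
      (pvKeepFold ml its s, pvMsgFold ml its m) := by
  intro its
  induction its with
  | nil => intro s m; simp [pvKeepFold, pvMsgFold]
  | cons e its ih =>
      intro s m
      simp only [List.foldl_cons, pvKeepFold, pvMsgFold] at ih ⊢
      rw [ih]
      rfl

theorem pvPass2_eq (ml : Int) (its : List (Int × List Int)) :
    pvPass2 ml its = (pvKeepFold ml its PySem.Set.empty, pvMsgFold ml its PySem.Dict.empty) := by
  unfold pvPass2
  exact pvPass2_foldl ml its _ _

theorem pvKeepFold_mem (ml : Int) : ∀ (its : List (Int × List Int)) (s0 : PySem.Set Int) (x : Int),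
    x ∈ pvKeepFold ml its s0 ↔ x ∈ s0 ∨ ∃ e ∈ its, x ∈ pvKeptOf ml e.2 := by
  intro its
  induction its with
  | nil => intro s0 x; simp [pvKeepFold]
  | cons e its ih =>
      intro s0 x
      simp only [pvKeepFold, List.foldl_cons] at ih ⊢
      rw [ih]
      rw [PySem.Set.mem_update]
      constructor
      · rintro ((h | h) | ⟨e', he', hx⟩)
        · exact Or.inl h
        · exact Or.inr ⟨e, by simp, by simpa [pvKeptOf] using h⟩
        · exact Or.inr ⟨e', by simp [he'], hx⟩
      · rintro (h | ⟨e', he', hx⟩)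
        · exact Or.inl (Or.inl h)
        · rcases List.mem_cons.mp he' with rfl | he''
          · exact Or.inl (Or.inr (by simpa [pvKeptOf] using hx))
          · exact Or.inr ⟨e', he'', hx⟩

theorem pvMsgFold_none (ml : Int) : ∀ (its : List (Int × List Int)) (m0 : PySem.Dict Int String)
    (q : Int), (∀ e ∈ its, e.1 ≠ q) → (pvMsgFold ml its m0).get? q = m0.get? q := by
  intro its
  induction its with
  | nil => intro m0 q _; simp [pvMsgFold]
  | cons e its ih =>
      intro m0 q h
      simp only [pvMsgFold, List.foldl_cons] at ih ⊢
      rw [ih _ q (fun e' he' => h e' (by simp [he']))]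
      split
      · exact PySem.Dict.get?_insert_of_ne m0 _ (fun hEq => h e (by simp) hEq.symm)
      · rfl

theorem pvMsgFold_get (ml : Int) : ∀ (its : List (Int × List Int)) (m0 : PySem.Dict Int String)
    (e : Int × List Int), ((its.map Prod.fst).Nodup) → e ∈ its →
    (pvMsgFold ml its m0).get? e.1 =
      if ml ≠ 0 ∧ ml < (e.2.length : Int)
        then some (pvMsgStr ((e.2.length : Int) - ml)) else m0.get? e.1 := by
  intro its
  induction its with
  | nil => intro m0 e _ h; simp at h
  | cons a its ih =>
      intro m0 e hnd he
      simp only [List.map_cons, List.nodup_cons] at hnd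
      have hstep : pvMsgFold ml (a :: its) m0 =
          pvMsgFold ml its (if ml ≠ 0 ∧ ml < (a.2.length : Int)
            then m0.insert a.1 (pvMsgStr ((a.2.length : Int) - ml)) else m0) := by
        simp [pvMsgFold]
      rw [hstep]
      rcases List.mem_cons.mp he with rfl | he'
      · rw [pvMsgFold_none ml its _ e.1
          (fun e' he'' hEq => hnd.1 (hEq ▸ List.mem_map_of_mem he''))]
        split_ifs
        · exact PySem.Dict.get?_insert_self m0 _ _
        · rfl
      · rw [ih _ e hnd.2 he']
        have hne : e.1 ≠ a.1 := by
          intro hEq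
          exact hnd.1 (hEq ▸ List.mem_map_of_mem he')
        split_ifs
        · rfl
        · exact PySem.Dict.get?_insert_of_ne m0 _ hne
        · rfl

-- ---------- pass 3 (emit) ----------

theorem pvPass3_pre (keep : PySem.Set Int) (msg : PySem.Dict Int String) :
    ∀ (xs ys : List String) (i : Int), (∀ l ∈ xs, pvIsHeader l = false) →
    pvPass3 keep msg i (-1) (xs ++ ys) = xs ++ pvPass3 keep msg (i + xs.length) (-1) ys := by
  intro xs
  induction xs with
  | nil => intro ys i _; simp
  | cons x xs ih =>
      intro ys i h
      have hx : pvIsHeader x = false := h x (by simp)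
      rw [List.cons_append, pvPass3]
      simp only [hx, Bool.false_eq_true, if_false]
      have hc : ((-1 : Int) < 0 || PySem.Set.contains keep i) = true := by simp
      rw [if_pos hc, ih ys (i + 1) (fun l hl => h l (by simp [hl]))]
      have hidx : i + 1 + (xs.length : Int) = i + (((x :: xs).length : Int)) := by
        simp only [List.length_cons]; push_cast; ring
      rw [hidx]
      simp

theorem pvPass3_content (keep : PySem.Set Int) (msg : PySem.Dict Int String) :
    ∀ (xs ys : List String) (i p : Int), (∀ l ∈ xs, pvIsHeader l = false) → 0 ≤ p →
    pvPass3 keep msg i p (xs ++ ys) =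
      ((pvEnum i xs).filter (fun q => PySem.Set.contains keep q.1)).map Prod.snd ++
        pvPass3 keep msg (i + xs.length) p ys := by
  intro xs
  induction xs with
  | nil => intro ys i p _ _; simp [pvEnum]
  | cons x xs ih =>
      intro ys i p h hp
      have hx : pvIsHeader x = false := h x (by simp)
      rw [List.cons_append, pvPass3]
      simp only [hx, Bool.false_eq_true, if_false]
      have hcur : (p < 0 || PySem.Set.contains keep i) = PySem.Set.contains keep i := by
        have : ¬(p < 0) := by omega
        simp [this]
      rw [hcur, ih ys (i + 1) p (fun l hl => h l (by simp [hl])) hp]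
      have hidx : i + 1 + (xs.length : Int) = i + (((x :: xs).length : Int)) := by
        simp only [List.length_cons]; push_cast; ring
      rw [hidx]
      simp only [pvEnum, List.filter_cons]
      by_cases hk : i ∈ keep
      · simp [hk]
      · simp [hk]

-- the per-section equality
theorem pvSection_eq (ml : Int) (g : Option String) (keep : PySem.Set Int)
    (msg : PySem.Dict Int String) (l : String) (tw : List String) (i : Int)
    (hl : pvIsHeader l = true) (htw : ∀ x ∈ tw, pvIsHeader x = false)
    (hkeep : ∀ q ∈ pvEnum (i + 1) tw,
      PySem.Set.contains keep q.1 = decide (q.1 ∈ pvKeptOf ml ((pvF g (i + 1) tw).map Prod.fst)))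
    (hmsg : msg.get? i =
      if tw.isEmpty then none
      else if ml ≠ 0 ∧ ml < ((pvF g (i + 1) tw).length : Int)
        then some (pvMsgStr (((pvF g (i + 1) tw).length : Int) - ml)) else none) :
    (l :: (match msg.get? i with | some m => [m] | none => [])) ++
      ((pvEnum (i + 1) tw).filter (fun q => PySem.Set.contains keep q.1)).map Prod.snd =
    pvTrunc (l :: tw) ml g := by
  have hsel : (pvEnum (i + 1) tw).filter (fun q => PySem.Set.contains keep q.1) =
      (pvEnum (i + 1) tw).filter
        (fun q => decide (q.1 ∈ pvKeptOf ml ((pvF g (i + 1) tw).map Prod.fst))) :=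
    List.filter_congr (fun q hq => hkeep q hq)
  rw [hsel]
  by_cases htwE : tw.isEmpty = true
  · have htw0 : tw = [] := by simpa using htwE
    subst htw0
    simp only [htwE, if_true] at hmsg
    rw [hmsg]
    simp [pvTrunc, pvEnum]
  · have htw0 : tw ≠ [] := by simpa using htwE
    simp only [htwE, Bool.false_eq_true, if_false] at hmsg
    -- unfold pvTrunc on a two-or-more line section
    have hlen2 : ¬((l :: tw).length ≤ 1) := by
      cases tw with
      | nil => exact absurd rfl htw0
      | cons c cs => simp
    have htrunc : pvTrunc (l :: tw) ml g =
        (if ml ≠ 0 ∧ ml < ((tw.filter (pvMatchLine g)).length : Int)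
          then l :: pvMsgStr (((tw.filter (pvMatchLine g)).length : Int) - ml) ::
            PySem.List.slice (tw.filter (pvMatchLine g)) (some (-ml)) none
          else l :: tw.filter (pvMatchLine g)) := by
      simp only [pvTrunc.eq_def, if_neg hlen2]
      rw [pvTrunc_content g tw]
      split <;> rfl
    rw [htrunc]
    have hflen : (tw.filter (pvMatchLine g)).length = (pvF g (i + 1) tw).length := by
      rw [← pvF_map_snd g tw (i + 1), List.length_map]
    have hnd := pvEnum_fst_nodup tw (i + 1)
    by_cases hct : ml ≠ 0 ∧ ml < ((pvF g (i + 1) tw).length : Int)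
    · rw [hmsg, if_pos hct]
      rw [if_pos (by rw [hflen]; exact hct)]
      -- both kept lists are drops at the same position
      have hkept : pvKeptOf ml ((pvF g (i + 1) tw).map Prod.fst) =
          ((pvF g (i + 1) tw).drop
            (PySem.List.clampIdx (pvF g (i + 1) tw).length (-ml))).map Prod.fst := by
        unfold pvKeptOf
        rw [if_pos (by rw [List.length_map]; exact hct)]
        rw [PySem.List.slice_some_none, List.length_map, List.map_drop]
      rw [hkept]
      rw [pvSelect_sublist ((List.drop_sublist _ _).trans (pvF_sublist g (i + 1) tw)) hnd]
      rw [PySem.List.slice_some_none]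
      rw [← pvF_map_snd g tw (i + 1), List.length_map, List.map_drop]
      simp [hflen]
    · rw [hmsg, if_neg hct]
      rw [if_neg (by rw [hflen]; exact hct)]
      have hkept : pvKeptOf ml ((pvF g (i + 1) tw).map Prod.fst) =
          (pvF g (i + 1) tw).map Prod.fst := by
        unfold pvKeptOf
        rw [if_neg (by rw [List.length_map]; exact hct)]
      rw [hkept]
      rw [pvSelect_sublist (pvF_sublist g (i + 1) tw) hnd]
      rw [← pvF_map_snd g tw (i + 1)]
      simp

-- the grand induction over sections
theorem pvEmit_sections (ml : Int) (g : Option String) (keep : PySem.Set Int)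
    (msg : PySem.Dict Int String) : ∀ (n : Nat) (rest : List String), rest.length ≤ n →
    (∀ l ls, rest = l :: ls → pvIsHeader l = true) → ∀ (i cur : Int), 0 ≤ i →
    (∀ x : Int, i ≤ x →
      (PySem.Set.contains keep x = true ↔ ∃ e ∈ pvItemsSpec g i rest, x ∈ pvKeptOf ml e.2)) →
    (∀ q : Int, i ≤ q → msg.get? q =
      ((pvItemsSpec g i rest).find? (fun e => e.1 == q)).bind
        (fun e => if ml ≠ 0 ∧ ml < ((e.2.length : Int))
          then some (pvMsgStr ((e.2.length : Int) - ml)) else none)) →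
    pvPass3 keep msg i cur rest = (pvSections rest).flatMap (fun s => pvTrunc s ml g) := by
  intro n
  induction n with
  | zero =>
      intro rest hlen _ i cur _ _ _
      have : rest = [] := List.eq_nil_of_length_eq_zero (Nat.le_zero.mp hlen)
      subst this
      simp [pvPass3, pvSections]
  | succ n ih =>
      intro rest hlen hhead i cur hi Hkeep Hmsg
      match rest with
      | [] => simp [pvPass3, pvSections]
      | l :: ls =>
        have hl : pvIsHeader l = true := hhead l ls rfl
        have htw : ∀ x ∈ ls.takeWhile pvNH, pvIsHeader x = false := by
          intro x hx
          have := List.mem_takeWhile_imp hx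
          simpa [pvNH] using this
        have hlen' : (ls.dropWhile pvNH).length ≤ n := by
          have := (List.dropWhile_sublist (p := pvNH) (l := ls)).length_le
          simp only [List.length_cons] at hlen
          omega
        have hhead' : ∀ l' ls', ls.dropWhile pvNH = l' :: ls' → pvIsHeader l' = true := by
          intro l' ls' hEq
          have hh := List.head?_dropWhile_not pvNH ls
          rw [hEq] at hh
          simp only [List.head?_cons] at hh
          simpa [pvNH] using hh
        have hspec : pvItemsSpec g i (l :: ls) =
            (if (ls.takeWhile pvNH).isEmpty then []
              else [(i, (pvF g (i + 1) (ls.takeWhile pvNH)).map Prod.fst)]) ++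
            pvItemsSpec g (i + 1 + (ls.takeWhile pvNH).length) (ls.dropWhile pvNH) := by
          rw [pvItemsSpec]
          simp [hl]
        have hspecLB : ∀ e ∈ pvItemsSpec g (i + 1 + ((ls.takeWhile pvNH).length : Int))
            (ls.dropWhile pvNH), i + 1 + ((ls.takeWhile pvNH).length : Int) ≤ e.1 ∧
            (∀ x ∈ e.2, e.1 < x) := by
          intro e he
          have hb := pvItemsSpec_bounds g (ls.dropWhile pvNH).length _ (le_refl _) _ e he
          exact ⟨hb.1, fun x hx => (hb.2 x hx).1⟩
        -- one emit step
        rw [pvPass3]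
        simp only [hl, if_true]
        conv_lhs =>
          rw [show ls = ls.takeWhile pvNH ++ ls.dropWhile pvNH from
            (List.takeWhile_append_dropWhile).symm]
        rw [pvPass3_content keep msg _ _ _ i htw (by omega)]
        rw [← List.append_assoc]
        -- the head section
        have hsec : (l :: (match msg.get? i with | some m => [m] | none => [])) ++
            ((pvEnum (i + 1) (ls.takeWhile pvNH)).filter
              (fun q => PySem.Set.contains keep q.1)).map Prod.snd =
            pvTrunc (l :: ls.takeWhile pvNH) ml g := by
          apply pvSection_eq ml g keep msg l (ls.takeWhile pvNH) i hl htw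
          · -- keep oracle on this section's content indices
            intro q hq
            have hqb := pvEnum_fst_bounds _ (i + 1) q hq
            have hiff := Hkeep q.1 (by omega)
            rw [hspec] at hiff
            have htwne : ¬(ls.takeWhile pvNH).isEmpty = true := by
              intro hE
              rw [List.isEmpty_iff.mp hE] at hq
              simp [pvEnum] at hq
            have hiff2 : (PySem.Set.contains keep q.1 = true) ↔
                q.1 ∈ pvKeptOf ml ((pvF g (i + 1) (ls.takeWhile pvNH)).map Prod.fst) := by
              rw [hiff]
              constructor
              · rintro ⟨e, he, hx⟩
                rcases List.mem_append.mp he with he | he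
                · simp only [htwne, Bool.false_eq_true, if_false, List.mem_singleton] at he
                  subst he
                  exact hx
                · have hb := hspecLB e he
                  have := hb.2 q.1 (pvKeptOf_subset ml e.2 q.1 hx)
                  omega
              · intro hx
                refine ⟨(i, (pvF g (i + 1) (ls.takeWhile pvNH)).map Prod.fst), ?_, hx⟩
                simp [htwne]
            rw [Bool.eq_iff_iff, decide_eq_true_iff]
            exact hiff2
          · -- message oracle at the header index
            have hmsgi := Hmsg i (le_refl i)
            rw [hspec] at hmsgi
            by_cases htwE : (ls.takeWhile pvNH).isEmpty = true
            · simp only [htwE, if_true, List.nil_append] at hmsgi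
              rw [hmsgi]
              have hfind : (pvItemsSpec g (i + 1 + ((ls.takeWhile pvNH).length : Int))
                  (ls.dropWhile pvNH)).find? (fun e => e.1 == i) = none := by
                rw [List.find?_eq_none]
                intro e he
                have := (hspecLB e he).1
                simp only [beq_iff_eq]
                omega
              rw [hfind]
              simp [htwE]
            · simp only [htwE, Bool.false_eq_true, if_false, List.singleton_append] at hmsgi
              rw [hmsgi]
              rw [List.find?_cons]
              simp only [beq_self_eq_true]
              simp [htwE]
        rw [hsec]
        -- the remaining sections by induction
        rw [ih (ls.dropWhile pvNH) hlen' hhead' (i + 1 + ((ls.takeWhile pvNH).length : Int)) i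
          (by omega) ?hk ?hm]
        · conv_rhs => rw [pvSections]
          rw [List.flatMap_cons]
        case hk =>
          intro x hx
          rw [Hkeep x (by omega), hspec]
          constructor
          · rintro ⟨e, he, hmem⟩
            rcases List.mem_append.mp he with he | he
            · exfalso
              split at he
              · simp at he
              · simp only [List.mem_singleton] at he
                subst he
                have hmem' := pvKeptOf_subset ml _ x hmem
                obtain ⟨q, hq, rfl⟩ := List.mem_map.mp hmem'
                have hqb := pvEnum_fst_bounds _ (i + 1) q ((pvF_sublist g (i + 1) _).subset hq)
                omega
            · exact ⟨e, he, hmem⟩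
          · rintro ⟨e, he, hmem⟩
            exact ⟨e, List.mem_append.mpr (Or.inr he), hmem⟩
        case hm =>
          intro q hqge
          rw [Hmsg q (by omega), hspec]
          congr 1
          split
          · rfl
          · rw [List.singleton_append, List.find?_cons]
            have : ((i, (pvF g (i + 1) (ls.takeWhile pvNH)).map Prod.fst).1 == q) = false := by
              simp only [beq_eq_false_iff_ne, ne_eq]
              omega
            rw [this]

-- ===== VERDICT (by name: the statement is the Claim_ definition above) =====
theorem filter_batch_output_py_spec : Claim_equal_filter_batch_output_py := by
  unfold Claim_equal_filter_batch_output_py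
  intro result max_lines grep _
  unfold Spec_filter_batch_output_py filter_batch_output_py filter_batch_output_py_alt
  by_cases h : (max_lines == 0 && pvFalsyGrep grep) = true
  · simp [h]
  · simp only [h, Bool.false_eq_true, if_false]
    set lines := (PySem.Str.split? result "\n").getD [] with hlines
    set pre := lines.takeWhile pvNH with hpre
    set rest := lines.dropWhile pvNH with hrest
    have hsplit : lines = pre ++ rest := (List.takeWhile_append_dropWhile).symm
    have hpreNH : ∀ l ∈ pre, pvIsHeader l = false := by
      intro l hl
      have := List.mem_takeWhile_imp hl
      simpa [pvNH] using this
    have hheadR : ∀ l' ls', rest = l' :: ls' → pvIsHeader l' = true := by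
      intro l' ls' hEq
      have hh := List.head?_dropWhile_not pvNH lines
      rw [← hrest, hEq] at hh
      simp only [List.head?_cons] at hh
      simpa [pvNH] using hh
    -- pass 1 computes the items spec
    have hM : pvPass1 grep 0 (-1) PySem.Dict.empty lines =
        PySem.Dict.mk (pvItemsSpec grep 0 lines) := by
      have hkeys : (PySem.Dict.empty : PySem.Dict Int (List Int)).keys = [] := rfl
      have := (pvPass1_char grep lines.length lines (le_refl _)).1 0 PySem.Dict.empty
        (by omega) (by rw [hkeys]; exact List.nodup_nil) (by rw [hkeys]; intro k hk; cases hk)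
      simpa using this
    have hskip : pvItemsSpec grep 0 lines = pvItemsSpec grep ((pre.length : Int)) rest := by
      conv_lhs => rw [hsplit]
      rw [pvItemsSpec_skip grep pre rest 0 hpreNH]
      norm_num
    have hnd : ((pvItemsSpec grep ((pre.length : Int)) rest).map Prod.fst).Nodup :=
      (pvItemsSpec_keys_pairwise grep rest.length rest (le_refl _) _).nodup
    rw [hM, pvPass2_eq]
    have hitems : (PySem.Dict.mk (pvItemsSpec grep 0 lines)).items
        = pvItemsSpec grep ((pre.length : Int)) rest := by
      rw [← hskip]
    rw [hitems]
    -- A side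
    rw [pvLoopA_pre max_lines grep lines []]
    rw [← hpre, ← hrest]
    -- B side: preamble then sections
    conv_rhs => rw [hsplit]
    rw [pvPass3_pre _ _ pre rest 0 hpreNH, zero_add]
    rw [pvEmit_sections max_lines grep _ _ rest.length rest (le_refl _) hheadR
      ((pre.length : Int)) (-1) (by positivity) ?hk ?hm]
    · simp
    case hk =>
      intro x _
      rw [PySem.Set.contains_iff, pvKeepFold_mem]
      simp [PySem.Set.empty]
    case hm =>
      intro q _
      by_cases hq : ∃ e ∈ pvItemsSpec grep ((pre.length : Int)) rest, e.1 = q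
      · obtain ⟨e, he, hEq⟩ := hq
        subst hEq
        rw [pvMsgFold_get max_lines _ _ e hnd he, pvFind_of_nodup _ e hnd he]
        show (if max_lines ≠ 0 ∧ max_lines < (e.2.length : Int)
            then some (pvMsgStr ((e.2.length : Int) - max_lines))
            else PySem.Dict.empty.get? e.1) =
          (if max_lines ≠ 0 ∧ max_lines < (e.2.length : Int)
            then some (pvMsgStr ((e.2.length : Int) - max_lines)) else none)
        split_ifs
        · rfl
        · exact PySem.Dict.get?_empty e.1
      · push Not at hq
        rw [pvMsgFold_none max_lines _ _ q hq]
        rw [List.find?_eq_none.mpr (fun e he => by simp [hq e he])]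
        simp [PySem.Dict.get?_empty]
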